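-- pv_equiv track=rewrite | github.com/jmzhao/foo.bar | save_beta_rabbit/solution.py | all_possible_cost
-- ===== SOURCE A (Python) =====
-- def all_possible_cost(grid) :
--     n = len(grid)
--     a = [[set() for _ in range(n)] for _ in range(n)]
--     for i in range(n) :
--         for j in range(n) :
--             if i == 0 :
--                 if j == 0 :
--                     a[i][j] = set([0])
--                 else :
--                     a[i][j] = set(x + grid[i][j] for x in a[i][j-1])
--             else :
--                 if j == 0 :
--                     a[i][j] = set(x + grid[i][j] for x in a[i-1][j])
--                 else :
--                     a[i][j] = set(x + grid[i][j] for x in a[i-1][j] | a[i][j-1])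
--     return a[n-1][n-1]
-- ===== SOURCE B (Python) =====
-- def all_possible_cost(grid):
--     # Top-down memoized recursion: reach(i, j) = set of path sums from the
--     # top-left to (i, j) (excluding grid[0][0], as in the original).
--     n = len(grid)
--     memo = {}
--     def reach(i, j):
--         if (i, j) not in memo:
--             if i == 0 and j == 0:
--                 memo[(i, j)] = {0}
--             else:
--                 prev = set()
--                 if i > 0:
--                     prev |= reach(i - 1, j)
--                 if j > 0:
--                     prev |= reach(i, j - 1)
--                 memo[(i, j)] = {x + grid[i][j] for x in prev}
--         return memo[(i, j)]
--     return reach(n - 1, n - 1)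
-- ===== Notes on version B (the rewrite author's own statement) =====
-- stated objective: alternative
-- what changed: Replaces A's bottom-up double loop filling a full n-by-n table of sets with a top-down memoized recursion reach(i,j) that computes each cell's path-sum set on demand and caches it in a dict keyed by cell.
import Mathlib
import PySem

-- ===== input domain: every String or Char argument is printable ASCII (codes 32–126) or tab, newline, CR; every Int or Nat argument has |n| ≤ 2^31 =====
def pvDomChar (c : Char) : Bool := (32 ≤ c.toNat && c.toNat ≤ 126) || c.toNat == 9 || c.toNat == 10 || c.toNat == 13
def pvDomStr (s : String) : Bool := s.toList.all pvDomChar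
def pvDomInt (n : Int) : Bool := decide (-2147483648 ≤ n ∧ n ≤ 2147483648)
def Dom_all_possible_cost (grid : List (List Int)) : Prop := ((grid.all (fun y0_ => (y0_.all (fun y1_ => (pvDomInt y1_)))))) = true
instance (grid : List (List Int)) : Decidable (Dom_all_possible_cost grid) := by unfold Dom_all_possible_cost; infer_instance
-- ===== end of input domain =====

-- B replaces A's bottom-up double loop over a full n×n table with a top-down
-- memoized recursion reach(i,j) cached in a dict (alternative decomposition,
-- same time class).

-- ===== PORT A =====
-- grid[i][j] (total form; indices are in range under Pre_)
def pvGGet (grid : List (List Int)) (i j : Int) : Int :=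
  PySem.List.pyGetD (PySem.List.pyGetD grid i []) j 0

-- a[i][j] (total form)
def pvCell (a : List (List (List Int))) (i j : Int) : List Int :=
  PySem.List.pyGetD (PySem.List.pyGetD a i []) j []

-- body of A's double loop: compute the set for cell (i, j) and store it (a[i][j] = v)
def pvStepA (grid : List (List Int)) (a : List (List (List Int))) (i j : Int) :
    List (List (List Int)) :=
  let v : PySem.Set Int :=
    if i = 0 then
      if j = 0 then PySem.Set.ofList [(0 : Int)]
      else PySem.Set.ofList ((pvCell a i (j-1)).map (fun x => x + pvGGet grid i j))
    else
      if j = 0 then PySem.Set.ofList ((pvCell a (i-1) j).map (fun x => x + pvGGet grid i j))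
      else PySem.Set.ofList
        ((PySem.Set.union (pvCell a (i-1) j) (pvCell a i (j-1))).map
          (fun x => x + pvGGet grid i j))
  PySem.List.pySetD a i (PySem.List.pySetD (PySem.List.pyGetD a i []) j v)

def all_possible_cost (grid : List (List Int)) : List Int :=
  let n : Int := PySem.List.len grid
  let a0 : List (List (List Int)) :=
    (PySem.List.pyRange 0 n).map (fun _ =>
      (PySem.List.pyRange 0 n).map (fun _ => (PySem.Set.empty : PySem.Set Int)))
  let a :=
    (PySem.List.pyRange 0 n).foldl (fun a i =>
      (PySem.List.pyRange 0 n).foldl (fun a j => pvStepA grid a i j) a) a0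
  pvCell a (n-1) (n-1)

-- ===== PORT B =====
-- reach(i, j) with the memo dict threaded through: returns (memo[(i,j)], memo).
-- 'prev = set(); if i>0: prev |= reach(i-1,j); if j>0: prev |= reach(i,j-1)'
-- becomes the corresponding PySem.Set.union chain starting from Set.empty.
def pvReach (g : List (List Int)) : Nat × Nat → PySem.Dict (Int × Int) (List Int) →
    List Int × PySem.Dict (Int × Int) (List Int)
  | (0, 0), memo =>
      match memo.get? ((0:Int), (0:Int)) with
      | some v => (v, memo)
      | none =>
          let s : PySem.Set Int := PySem.Set.ofList [(0 : Int)]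
          (s, memo.insert ((0:Int), (0:Int)) s)
  | (0, j'+1), memo =>
      match memo.get? ((0:Int), ((j':Int)+1)) with
      | some v => (v, memo)
      | none =>
          let r := pvReach g (0, j') memo
          let prev := PySem.Set.union PySem.Set.empty r.1
          let s := PySem.Set.ofList (prev.map (fun x => x + pvGGet g 0 ((j':Int)+1)))
          (s, r.2.insert ((0:Int), ((j':Int)+1)) s)
  | (i'+1, 0), memo =>
      match memo.get? (((i':Int)+1), (0:Int)) with
      | some v => (v, memo)
      | none =>
          let r := pvReach g (i', 0) memo
          let prev := PySem.Set.union PySem.Set.empty r.1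
          let s := PySem.Set.ofList (prev.map (fun x => x + pvGGet g ((i':Int)+1) 0))
          (s, r.2.insert (((i':Int)+1), (0:Int)) s)
  | (i'+1, j'+1), memo =>
      match memo.get? (((i':Int)+1), ((j':Int)+1)) with
      | some v => (v, memo)
      | none =>
          let r1 := pvReach g (i', j'+1) memo
          let r2 := pvReach g (i'+1, j') r1.2
          let prev := PySem.Set.union (PySem.Set.union PySem.Set.empty r1.1) r2.1
          let s := PySem.Set.ofList (prev.map (fun x => x + pvGGet g ((i':Int)+1) ((j':Int)+1)))
          (s, r2.2.insert (((i':Int)+1), ((j':Int)+1)) s)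
  termination_by ij _ => ij.1 + ij.2

-- For n = 0 Python B's reach(-1, -1) takes no neighbour branch and its empty set
-- comprehension returns set() without touching grid: the n ≤ 0 case returns [].
def all_possible_cost_alt (grid : List (List Int)) : List Int :=
  let n : Int := PySem.List.len grid
  if n ≤ 0 then []
  else (pvReach grid ((n-1).toNat, (n-1).toNat) PySem.Dict.empty).1

-- ===== PRECONDITION & SPEC =====
-- Pre_ excludes exactly the inputs where Python A raises IndexError: the empty grid
-- (a[-1] on an empty list) and, for n ≥ 2, grids with a row shorter than n
-- (grid[i][j] out of range); for n = 1 A touches no grid entry and returns {0}.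
def Pre_all_possible_cost (grid : List (List Int)) : Prop :=
  grid ≠ [] ∧ (grid.length = 1 ∨ ∀ row ∈ grid, grid.length ≤ row.length)
instance (grid : List (List Int)) : Decidable (Pre_all_possible_cost grid) := by
  unfold Pre_all_possible_cost; infer_instance

def pvWitness_all_possible_cost : List (List Int) := [[1, 2], [3, 4]]

def Spec_all_possible_cost (grid : List (List Int)) (out : List Int) : Prop :=
  out = all_possible_cost_alt grid
instance (grid : List (List Int)) (out : List Int) : Decidable (Spec_all_possible_cost grid out) := by
  unfold Spec_all_possible_cost; infer_instance

-- ===== CLAIM (what is proved, stated in full; the proofs are below) =====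
def Claim_equal_all_possible_cost : Prop :=
  ∀ (grid : List (List Int)), Dom_all_possible_cost grid → Pre_all_possible_cost grid →
    Spec_all_possible_cost grid (all_possible_cost grid)

-- ===== LEMMAS AND PROOFS =====

-- the mathematical recurrence both programs compute: set of path sums reaching (i, j)
def pvR (g : List (List Int)) : Nat → Nat → List Int
  | 0, 0 => PySem.Set.ofList [(0 : Int)]
  | 0, j+1 => PySem.Set.ofList ((pvR g 0 j).map (fun x => x + pvGGet g 0 ((j:Int)+1)))
  | i+1, 0 => PySem.Set.ofList ((pvR g i 0).map (fun x => x + pvGGet g ((i:Int)+1) 0))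
  | i+1, j+1 => PySem.Set.ofList
      ((PySem.Set.union (pvR g i (j+1)) (pvR g (i+1) j)).map
        (fun x => x + pvGGet g ((i:Int)+1) ((j:Int)+1)))
  termination_by i j => (i, j)

theorem pvR_nodup (g : List (List Int)) (i j : Nat) : (pvR g i j).Nodup := by
  cases i <;> cases j <;> (rw [pvR]; exact PySem.Set.nodup_ofList _)

-- generic invariant rule for a fold over range(lo, lo+len)
theorem pv_foldl_inv {α : Type} (lo : Int) (len : Nat) (f : α → Int → α)
    (P : Nat → α → Prop) (init : α) (h0 : P 0 init)
    (hs : ∀ (k : Nat) (a : α), k < len → P k a → P (k+1) (f a (lo + k))) :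
    P len ((PySem.List.pyRange lo (lo + (len:Int))).foldl f init) := by
  induction len with
  | zero =>
      have h : PySem.List.pyRange lo (lo + ((0:Nat):Int)) = [] := by
        simp [PySem.List.pyRange]
      rw [h]; simpa using h0
  | succ m ih =>
      have hb : lo + ((m+1 : Nat):Int) = (lo + (m:Int)) + 1 := by push_cast; ring
      rw [hb, PySem.List.pyRange_one_succ_right (by omega), List.foldl_append]
      exact hs m _ (by omega) (ih (fun k a hk hP => hs k a (by omega) hP))

theorem pv_foldl_inv0 {α : Type} (len : Nat) (f : α → Int → α)
    (P : Nat → α → Prop) (init : α) (h0 : P 0 init)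
    (hs : ∀ (k : Nat) (a : α), k < len → P k a → P (k+1) (f a (k:Int))) :
    P len ((PySem.List.pyRange 0 (len:Int)).foldl f init) := by
  have h := pv_foldl_inv 0 len f P init h0
    (fun k a hk hP => by simpa using hs k a hk hP)
  simpa using h

-- ==== A side ====

def pvGoodA (g : List (List Int)) (N I J : Nat) (a : List (List (List Int))) : Prop :=
  a.length = N ∧ (∀ x : Nat, x < N → (a.getD x []).length = N) ∧
  (∀ x y : Nat, x < N → y < N →
    pvCell a (x:Int) (y:Int) = (if x < I ∨ (x = I ∧ y < J) then pvR g x y else []))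

theorem pvCell_write (a : List (List (List Int))) (N I J : Nat) (v : List Int)
    (hlen : a.length = N) (hrow : (a.getD I []).length = N) (hI : I < N) (hJ : J < N)
    (x y : Nat) :
    pvCell (PySem.List.pySetD a (I:Int)
        (PySem.List.pySetD (PySem.List.pyGetD a (I:Int) []) (J:Int) v)) (x:Int) (y:Int)
      = if x = I ∧ y = J then v else pvCell a (x:Int) (y:Int) := by
  unfold pvCell
  rw [PySem.List.pyGetD_pySetD_natCast a I x _ _ (by omega)]
  by_cases hx : x = I
  · subst hx
    rw [if_pos rfl,
        PySem.List.pyGetD_pySetD_natCast _ J y _ _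
          (by rw [PySem.List.pyGetD_natCast]; rw [hrow]; omega)]
    by_cases hy : y = J
    · rw [if_pos hy, if_pos ⟨rfl, hy⟩]
    · rw [if_neg hy, if_neg (by tauto)]
  · rw [if_neg hx, if_neg (by tauto)]

theorem pvStepA_val (g : List (List Int)) (N I J : Nat) (hI : I < N) (hJ : J < N)
    (a : List (List (List Int))) (h : pvGoodA g N I J a) :
    pvStepA g a (I:Int) (J:Int) = PySem.List.pySetD a (I:Int)
      (PySem.List.pySetD (PySem.List.pyGetD a (I:Int) []) (J:Int) (pvR g I J)) := by
  obtain ⟨hlen, hrow, hval⟩ := h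
  unfold pvStepA
  match I, J with
  | 0, 0 =>
      rw [if_pos (by norm_num), if_pos (by norm_num), pvR]
  | 0, J'+1 =>
      rw [if_pos (by norm_num), if_neg (by omega)]
      have hc : ((J'+1 : Nat):Int) = ((J' : Nat):Int) + 1 := by push_cast; ring
      have h1 : ((J'+1 : Nat):Int) - 1 = ((J' : Nat):Int) := by push_cast; ring
      rw [h1, hval 0 J' (by omega) (by omega), if_pos (by omega), pvR, hc]
      rfl
  | I'+1, 0 =>
      rw [if_neg (by omega), if_pos (by norm_num)]
      have hc : ((I'+1 : Nat):Int) = ((I' : Nat):Int) + 1 := by push_cast; ring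
      have h1 : ((I'+1 : Nat):Int) - 1 = ((I' : Nat):Int) := by push_cast; ring
      rw [h1, hval I' 0 (by omega) (by omega), if_pos (by omega), pvR, hc]
      rfl
  | I'+1, J'+1 =>
      rw [if_neg (by omega), if_neg (by omega)]
      have hcI : ((I'+1 : Nat):Int) = ((I' : Nat):Int) + 1 := by push_cast; ring
      have hcJ : ((J'+1 : Nat):Int) = ((J' : Nat):Int) + 1 := by push_cast; ring
      have h1 : ((I'+1 : Nat):Int) - 1 = ((I' : Nat):Int) := by push_cast; ring
      have h2 : ((J'+1 : Nat):Int) - 1 = ((J' : Nat):Int) := by push_cast; ring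
      rw [h1, h2, hval I' (J'+1) (by omega) (by omega), if_pos (by omega),
          hval (I'+1) J' (by omega) (by omega), if_pos (by omega), pvR, hcI, hcJ]

theorem pvGoodA_step (g : List (List Int)) (N I J : Nat) (hI : I < N) (hJ : J < N)
    (a : List (List (List Int))) (h : pvGoodA g N I J a) :
    pvGoodA g N I (J+1) (pvStepA g a (I:Int) (J:Int)) := by
  have hlen := h.1
  have hrow := h.2.1
  have hval := h.2.2
  rw [pvStepA_val g N I J hI hJ a h]
  refine ⟨?_, ?_, ?_⟩
  · rw [PySem.List.length_pySetD]; exact hlen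
  · intro x hx
    rw [← PySem.List.pyGetD_natCast, PySem.List.pyGetD_pySetD_natCast a I x
      (PySem.List.pySetD (PySem.List.pyGetD a (I:Int) []) (J:Int) (pvR g I J)) [] (by omega)]
    by_cases hxI : x = I
    · rw [if_pos hxI, PySem.List.length_pySetD, PySem.List.pyGetD_natCast]
      exact hrow I hI
    · rw [if_neg hxI, PySem.List.pyGetD_natCast]; exact hrow x hx
  · intro x y hx hy
    rw [pvCell_write a N I J (pvR g I J) hlen (hrow I hI) hI hJ x y]
    by_cases hxy : x = I ∧ y = J
    · rw [if_pos hxy, if_pos (by omega), hxy.1, hxy.2]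
    · rw [if_neg hxy, hval x y hx hy]
      by_cases hc : x < I ∨ (x = I ∧ y < J)
      · rw [if_pos hc, if_pos (by omega)]
      · rw [if_neg hc, if_neg (by omega)]

theorem pvGoodA_row (g : List (List Int)) (N I : Nat) (hI : I < N)
    (a : List (List (List Int))) (h : pvGoodA g N I 0 a) :
    pvGoodA g N (I+1) 0
      ((PySem.List.pyRange 0 (N:Int)).foldl (fun a j => pvStepA g a (I:Int) j) a) := by
  have key : pvGoodA g N I N
      ((PySem.List.pyRange 0 (N:Int)).foldl (fun a j => pvStepA g a (I:Int) j) a) :=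
    pv_foldl_inv0 N _ (fun k a => pvGoodA g N I k a) a h
      (fun k a hk hP => pvGoodA_step g N I k hI hk a hP)
  obtain ⟨hlen, hrow, hval⟩ := key
  refine ⟨hlen, hrow, ?_⟩
  intro x y hx hy
  rw [hval x y hx hy]
  by_cases hc : x < I ∨ (x = I ∧ y < N)
  · rw [if_pos hc, if_pos (by omega)]
  · rw [if_neg hc, if_neg (by omega)]

theorem pvGoodA_init (g : List (List Int)) (N : Nat) :
    pvGoodA g N 0 0 ((PySem.List.pyRange 0 (N:Int)).map (fun _ =>
      (PySem.List.pyRange 0 (N:Int)).map (fun _ => (PySem.Set.empty : PySem.Set Int)))) := by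
  have hr : ∀ {β : Type} (r : β),
      (PySem.List.pyRange 0 (N:Int)).map (fun _ => r) = List.replicate N r := by
    intro β r
    rw [PySem.List.pyRange_zero_natCast, List.map_map]
    exact List.eq_replicate_iff.mpr ⟨by simp, by simp⟩
  rw [hr, hr]
  refine ⟨by simp, ?_, ?_⟩
  · intro x hx
    rw [List.getD_eq_getElem?_getD, List.getElem?_replicate, if_pos (by omega)]
    simp
  · intro x y hx hy
    unfold pvCell
    rw [if_neg (by omega)]
    simp [List.getD_eq_getElem?_getD, hx, hy, PySem.Set.empty]

theorem pvA_eq (g : List (List Int)) (hg : g ≠ []) :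
    all_possible_cost g = pvR g (g.length - 1) (g.length - 1) := by
  have hN : 1 ≤ g.length := by
    cases g with
    | nil => exact absurd rfl hg
    | cons h t => simp
  unfold all_possible_cost
  simp only [PySem.List.len_eq]
  set N := g.length with hNdef
  have key : pvGoodA g N N 0
      ((PySem.List.pyRange 0 (N:Int)).foldl (fun a i =>
        (PySem.List.pyRange 0 (N:Int)).foldl (fun a j => pvStepA g a i j) a)
        ((PySem.List.pyRange 0 (N:Int)).map (fun _ =>
          (PySem.List.pyRange 0 (N:Int)).map (fun _ => (PySem.Set.empty : PySem.Set Int))))) := by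
    exact pv_foldl_inv0 N _ (fun k a => pvGoodA g N k 0 a) _ (pvGoodA_init g N)
      (fun k a hk hP => pvGoodA_row g N k hk a hP)
  have hcast : (N:Int) - 1 = ((N - 1 : Nat):Int) := by omega
  rw [hcast]
  rw [key.2.2 (N-1) (N-1) (by omega) (by omega), if_pos (by omega)]

-- ==== B side ====

-- a memo is good if every cached cell holds its pvR value
def pvGoodM (g : List (List Int)) (memo : PySem.Dict (Int × Int) (List Int)) : Prop :=
  ∀ (p q : Nat) (v : List Int),
    memo.get? ((p:Int), (q:Int)) = some v → v = pvR g p q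

theorem pv_union_empty (s : List Int) (h : s.Nodup) :
    PySem.Set.union (PySem.Set.empty : PySem.Set Int) s = s := by
  show PySem.Set.update [] s = s
  rw [PySem.Set.update_nil_left]
  exact PySem.Set.ofList_eq_self_of_nodup _ h

theorem pvGoodM_insert (g : List (List Int)) (memo : PySem.Dict (Int × Int) (List Int))
    (h : pvGoodM g memo) (i j : Nat) :
    pvGoodM g (memo.insert ((i:Int), (j:Int)) (pvR g i j)) := by
  intro p q v hv
  rw [PySem.Dict.get?_insert] at hv
  by_cases he : ((p:Int), (q:Int)) = ((i:Int), (j:Int))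
  · rw [if_pos he, Option.some_inj] at hv
    have hp : p = i := by have := congrArg Prod.fst he; simpa using this
    have hq : q = j := by have := congrArg Prod.snd he; simpa using this
    rw [hp, hq]; exact hv.symm
  · rw [if_neg he] at hv
    exact h p q v hv

theorem pvReach_spec (g : List (List Int)) :
    ∀ (n i j : Nat), i + j ≤ n → ∀ (memo : PySem.Dict (Int × Int) (List Int)),
      pvGoodM g memo →
      (pvReach g (i, j) memo).1 = pvR g i j ∧ pvGoodM g (pvReach g (i, j) memo).2 := by
  intro n
  induction n with
  | zero =>
      intro i j hij memo hm
      have hi : i = 0 := by omega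
      have hj : j = 0 := by omega
      subst hi; subst hj
      rw [pvReach]
      cases hv : memo.get? ((0:Int), (0:Int)) with
      | some v =>
          exact ⟨hm 0 0 v hv, hm⟩
      | none =>
          simp only []
          constructor
          · rw [pvR]
          · have := pvGoodM_insert g memo hm 0 0
            rw [pvR] at this
            exact this
  | succ m ih =>
      intro i j hij memo hm
      match i, j with
      | 0, 0 =>
          rw [pvReach]
          cases hv : memo.get? ((0:Int), (0:Int)) with
          | some v =>
              exact ⟨hm 0 0 v hv, hm⟩
          | none =>
              constructor
              · rw [pvR]
              · have := pvGoodM_insert g memo hm 0 0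
                rw [pvR] at this
                exact this
      | 0, j'+1 =>
          rw [pvReach]
          cases hv : memo.get? ((0:Int), ((j':Int)+1)) with
          | some v =>
              have hc : ((j':Int)+1) = (((j'+1:Nat)):Int) := by push_cast; ring
              rw [hc] at hv
              exact ⟨hm 0 (j'+1) v hv, hm⟩
          | none =>
              obtain ⟨h1, h2⟩ := ih 0 j' (by omega) memo hm
              constructor
              · simp only []
                rw [h1, pv_union_empty _ (pvR_nodup g 0 j'), pvR]
              · simp only []
                have hc : ((j':Int)+1) = (((j'+1:Nat)):Int) := by push_cast; ring
                have := pvGoodM_insert g (pvReach g (0, j') memo).2 h2 0 (j'+1)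
                rw [pvR] at this
                rw [h1, pv_union_empty _ (pvR_nodup g 0 j'), hc]
                exact this
      | i'+1, 0 =>
          rw [pvReach]
          cases hv : memo.get? (((i':Int)+1), (0:Int)) with
          | some v =>
              have hc : ((i':Int)+1) = (((i'+1:Nat)):Int) := by push_cast; ring
              rw [hc] at hv
              exact ⟨hm (i'+1) 0 v hv, hm⟩
          | none =>
              obtain ⟨h1, h2⟩ := ih i' 0 (by omega) memo hm
              constructor
              · simp only []
                rw [h1, pv_union_empty _ (pvR_nodup g i' 0), pvR]
              · simp only []
                have hc : ((i':Int)+1) = (((i'+1:Nat)):Int) := by push_cast; ring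
                have := pvGoodM_insert g (pvReach g (i', 0) memo).2 h2 (i'+1) 0
                rw [pvR] at this
                rw [h1, pv_union_empty _ (pvR_nodup g i' 0), hc]
                exact this
      | i'+1, j'+1 =>
          rw [pvReach]
          cases hv : memo.get? (((i':Int)+1), ((j':Int)+1)) with
          | some v =>
              have hcI : ((i':Int)+1) = (((i'+1:Nat)):Int) := by push_cast; ring
              have hcJ : ((j':Int)+1) = (((j'+1:Nat)):Int) := by push_cast; ring
              rw [hcI, hcJ] at hv
              exact ⟨hm (i'+1) (j'+1) v hv, hm⟩
          | none =>
              obtain ⟨h1, h2⟩ := ih i' (j'+1) (by omega) memo hm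
              obtain ⟨h3, h4⟩ := ih (i'+1) j' (by omega) (pvReach g (i', j'+1) memo).2 h2
              constructor
              · simp only []
                rw [h1, h3, pv_union_empty _ (pvR_nodup g i' (j'+1)), pvR]
              · simp only []
                have hcI : ((i':Int)+1) = (((i'+1:Nat)):Int) := by push_cast; ring
                have hcJ : ((j':Int)+1) = (((j'+1:Nat)):Int) := by push_cast; ring
                have := pvGoodM_insert g (pvReach g (i'+1, j') (pvReach g (i', j'+1) memo).2).2
                  h4 (i'+1) (j'+1)
                rw [pvR] at this
                rw [h1, h3, pv_union_empty _ (pvR_nodup g i' (j'+1)), hcI, hcJ]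
                exact this

theorem pvB_eq (g : List (List Int)) (hg : g ≠ []) :
    all_possible_cost_alt g = pvR g (g.length - 1) (g.length - 1) := by
  have hN : 1 ≤ g.length := by
    cases g with
    | nil => exact absurd rfl hg
    | cons h t => simp
  unfold all_possible_cost_alt
  simp only [PySem.List.len_eq]
  rw [if_neg (by omega)]
  have hc : ((g.length : Int) - 1).toNat = g.length - 1 := by omega
  rw [hc]
  have hgood : pvGoodM g PySem.Dict.empty := by
    intro p q v hv
    rw [PySem.Dict.get?_empty] at hv
    exact absurd hv (by simp)
  exact (pvReach_spec g (g.length - 1 + (g.length - 1)) (g.length - 1) (g.length - 1)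
    (le_refl _) PySem.Dict.empty hgood).1

-- ===== VERDICT (by name: the statement is the Claim_ definition above) =====
theorem all_possible_cost_spec : Claim_equal_all_possible_cost := by
  intro grid _ hPre
  unfold Spec_all_possible_cost
  rw [pvA_eq grid hPre.1, pvB_eq grid hPre.1]
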